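-- pv_equiv track=rewrite | github.com/jgtolentino/bruno-agentic-cli | Documents/GitHub/InsightPulseAI_SKR/scripts/skr_dedupe.py | choose_representative
-- ===== SOURCE A (Python) =====
-- def choose_representative(entries, group):
--     """Choose the representative entry from a group of duplicates"""
--     # Default strategy: keep the newest, most detailed entry
--     grouped_entries = [entries[i] for i in group]
--
--     # Sort by last modified (newest first) and then by size (largest first)
--     sorted_entries = sorted(
--         zip(group, grouped_entries),
--         key=lambda x: (x[1]['last_modified'], x[1]['size']),
--         reverse=True
--     )
--
--     # Return the index of the chosen representative
--     return sorted_entries[0][0]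
-- ===== SOURCE B (Python) =====
-- def choose_representative(entries, group):
--     """Choose the representative entry from a group of duplicates"""
--     # Single-pass argmax instead of sorting: keep the first index whose
--     # (last_modified, size) key is strictly greatest.
--     best = group[0]
--     best_key = (entries[best]['last_modified'], entries[best]['size'])
--     for i in group[1:]:
--         key = (entries[i]['last_modified'], entries[i]['size'])
--         if key > best_key:
--             best, best_key = i, key
--     return best
-- ===== Notes on version B (the rewrite author's own statement) =====
-- stated objective: faster
-- what changed: Replaces the reverse stable sort of the whole (index, entry) list with a single-pass strict argmax over the group (ties keep the earlier index, matching the stable reverse sort).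
import Mathlib
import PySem

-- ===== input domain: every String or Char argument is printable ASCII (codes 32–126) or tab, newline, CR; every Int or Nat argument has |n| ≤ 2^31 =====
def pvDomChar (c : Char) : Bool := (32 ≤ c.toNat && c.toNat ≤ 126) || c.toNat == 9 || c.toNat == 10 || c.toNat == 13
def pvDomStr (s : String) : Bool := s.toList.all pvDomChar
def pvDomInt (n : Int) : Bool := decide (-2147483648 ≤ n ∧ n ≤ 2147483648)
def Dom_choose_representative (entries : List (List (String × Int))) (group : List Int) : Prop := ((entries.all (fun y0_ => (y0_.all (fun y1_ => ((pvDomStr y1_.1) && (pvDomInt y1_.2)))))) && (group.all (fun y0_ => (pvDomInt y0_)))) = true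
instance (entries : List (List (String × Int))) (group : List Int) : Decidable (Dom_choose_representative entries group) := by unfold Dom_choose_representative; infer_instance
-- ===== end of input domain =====

-- B replaces A's reverse stable sort of the (index, entry) pairs by a single-pass strict argmax over the group.


-- ===== PORT A =====
-- entries[i] (IndexError = none, excluded by Pre_; .getD [] is the total form)
def pvEntry (entries : List (List (String × Int))) (i : Int) : List (String × Int) :=
  (PySem.List.pyGet? entries i).getD []
-- e['last_modified'] / e['size']: first-match lookup; Pre_ guarantees the key is present (KeyError otherwise)
def pvLM (e : List (String × Int)) : Int := (e.lookup "last_modified").getD 0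
def pvSz (e : List (String × Int)) : Int := (e.lookup "size").getD 0

def choose_representative (entries : List (List (String × Int))) (group : List Int) : Int :=
  let grouped_entries := group.map (fun i => pvEntry entries i)
  let sorted_entries :=
    PySem.List.sorted2 (group.zip grouped_entries) (fun x => pvLM x.2) (fun x => pvSz x.2) true
  ((PySem.List.pyGet? sorted_entries 0).getD (0, [])).1

-- ===== PORT B =====
def choose_representative_alt (entries : List (List (String × Int))) (group : List Int) : Int :=
  match group with
  | [] => 0  -- group[0] raises IndexError here; excluded by Pre_
  | g0 :: rest =>
    (rest.foldl
      (fun (b : Int × Int × Int) i =>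
        let k := (pvLM (pvEntry entries i), pvSz (pvEntry entries i))
        if b.2.1 < k.1 ∨ (b.2.1 = k.1 ∧ b.2.2 < k.2) then (i, k) else b)
      (g0, (pvLM (pvEntry entries g0), pvSz (pvEntry entries g0)))).1

-- ===== PRECONDITION & SPEC =====
-- Exactly where the Python A returns: group non-empty (else IndexError), every index in range
-- (else IndexError), and both keys present in every selected entry (else KeyError).
def Pre_choose_representative (entries : List (List (String × Int))) (group : List Int) : Prop :=
  group ≠ [] ∧ ∀ i ∈ group, PySem.Raise.InRange entries.length i ∧
    ((pvEntry entries i).lookup "last_modified").isSome ∧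
    ((pvEntry entries i).lookup "size").isSome
instance (entries : List (List (String × Int))) (group : List Int) : Decidable (Pre_choose_representative entries group) := by unfold Pre_choose_representative; infer_instance

def pvWitness_choose_representative : (List (List (String × Int))) × List Int :=
  ([[("last_modified", 5), ("size", 7)], [("last_modified", 5), ("size", 9)]], [0, 1])

def Spec_choose_representative (entries : List (List (String × Int))) (group : List Int) (out : Int) : Prop := out = choose_representative_alt entries group
instance (entries : List (List (String × Int))) (group : List Int) (out : Int) : Decidable (Spec_choose_representative entries group out) := by unfold Spec_choose_representative; infer_instance

-- ===== CLAIM (what is proved, stated in full; the proofs are below) =====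
def Claim_equal_choose_representative : Prop := ∀ (entries : List (List (String × Int))) (group : List Int), Dom_choose_representative entries group → Pre_choose_representative entries group → Spec_choose_representative entries group (choose_representative entries group)

-- ===== LEMMAS AND PROOFS =====

-- the (last_modified, size) key of entry index i
def pvKey (entries : List (List (String × Int))) (i : Int) : Int × Int :=
  (pvLM (pvEntry entries i), pvSz (pvEntry entries i))

-- the canonical strict-lex argmax fold over indices
def pvArgmax (entries : List (List (String × Int))) (rest : List Int) (g0 : Int) : Int :=
  rest.foldl
    (fun b y =>
      if (pvKey entries b).1 < (pvKey entries y).1 ∨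
         ((pvKey entries b).1 = (pvKey entries y).1 ∧ (pvKey entries b).2 < (pvKey entries y).2)
      then y else b) g0

-- B's pair-state fold computes the canonical argmax (the pair's second component is always the key of its first)
theorem alt_aux (entries : List (List (String × Int))) :
    ∀ (rest : List Int) (g0 : Int),
      (rest.foldl
        (fun (b : Int × Int × Int) i =>
          if b.2.1 < pvLM (pvEntry entries i) ∨
             (b.2.1 = pvLM (pvEntry entries i) ∧ b.2.2 < pvSz (pvEntry entries i))
          then (i, (pvLM (pvEntry entries i), pvSz (pvEntry entries i))) else b)
        (g0, (pvLM (pvEntry entries g0), pvSz (pvEntry entries g0)))).1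
      = pvArgmax entries rest g0 := by
  intro rest
  induction rest with
  | nil => intro g0; rfl
  | cons y ys ih =>
    intro g0
    simp only [List.foldl_cons, pvArgmax, pvKey]
    by_cases h : pvLM (pvEntry entries g0) < pvLM (pvEntry entries y) ∨
        (pvLM (pvEntry entries g0) = pvLM (pvEntry entries y) ∧
         pvSz (pvEntry entries g0) < pvSz (pvEntry entries y))
    · simpa [h] using ih y
    · simpa [h] using ih g0

-- B's port equals the canonical argmax
theorem alt_eq_argmax (entries : List (List (String × Int))) (g0 : Int) (rest : List Int) :
    choose_representative_alt entries (g0 :: rest) = pvArgmax entries rest g0 := by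
  unfold choose_representative_alt
  dsimp only
  exact alt_aux entries rest g0

-- head of the insertion-sort fold is the strict argmax under `before`
theorem foldl_insertBy_head {α : Type} (before : α → α → Bool) :
    ∀ (xs : List α) (h : α) (t : List α),
      (xs.foldl (fun acc x => PySem.List.insertBy before x acc) (h :: t)).head?
        = some (xs.foldl (fun b y => if before y b then y else b) h) := by
  intro xs
  induction xs with
  | nil => intro h t; rfl
  | cons y ys ih =>
    intro h t
    simp only [List.foldl_cons, PySem.List.insertBy]
    by_cases hb : before y h
    · simpa [hb] using ih y (h :: t)
    · simpa [hb] using ih h (PySem.List.insertBy before y t)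

-- the pair-carrying argmax fold of A's sorted comparison equals the canonical one
theorem pairfold_eq_argmax (entries : List (List (String × Int))) :
    ∀ (rest : List Int) (g0 : Int),
      (rest.foldl
        (fun (b : Int × List (String × Int)) y =>
          if (decide (pvLM b.2 < pvLM (pvEntry entries y)) ||
              (!decide (pvLM (pvEntry entries y) < pvLM b.2) &&
               decide (pvSz b.2 < pvSz (pvEntry entries y))))
          then (y, pvEntry entries y) else b)
        (g0, pvEntry entries g0)).1
      = pvArgmax entries rest g0 := by
  intro rest
  induction rest with
  | nil => intro g0; rfl
  | cons y ys ih =>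
    intro g0
    simp only [List.foldl_cons, pvArgmax, pvKey]
    by_cases h : pvLM (pvEntry entries g0) < pvLM (pvEntry entries y) ∨
        (pvLM (pvEntry entries g0) = pvLM (pvEntry entries y) ∧
         pvSz (pvEntry entries g0) < pvSz (pvEntry entries y))
    · have hb : (decide (pvLM (pvEntry entries g0) < pvLM (pvEntry entries y)) ||
          (!decide (pvLM (pvEntry entries y) < pvLM (pvEntry entries g0)) &&
           decide (pvSz (pvEntry entries g0) < pvSz (pvEntry entries y)))) = true := by
        simp only [Bool.or_eq_true, Bool.and_eq_true, Bool.not_eq_true', decide_eq_true_eq,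
          decide_eq_false_iff_not]
        omega
      simpa [hb, h] using ih y
    · have hb : (decide (pvLM (pvEntry entries g0) < pvLM (pvEntry entries y)) ||
          (!decide (pvLM (pvEntry entries y) < pvLM (pvEntry entries g0)) &&
           decide (pvSz (pvEntry entries g0) < pvSz (pvEntry entries y)))) = false := by
        simp only [Bool.or_eq_false_iff, Bool.and_eq_false_iff, Bool.not_eq_false',
          decide_eq_true_eq, decide_eq_false_iff_not]
        omega
      simpa [hb, h] using ih g0

-- A's sort-then-index equals the canonical argmax fold
theorem a_eq_argmax (entries : List (List (String × Int))) (g0 : Int) (rest : List Int) :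
    choose_representative entries (g0 :: rest) = pvArgmax entries rest g0 := by
  unfold choose_representative
  dsimp only
  have hzip : (g0 :: rest).zip ((g0 :: rest).map (fun i => pvEntry entries i))
      = (g0 :: rest).map (fun i => (i, pvEntry entries i)) := by
    have h := @List.zip_map' Int Int (List (String × Int)) id (fun i => pvEntry entries i) (g0 :: rest)
    simpa using h
  rw [hzip]
  simp only [List.map_cons, PySem.List.sorted2, if_true, List.foldl_cons]
  rw [show PySem.List.insertBy
      (fun a b => decide (pvLM b.2 < pvLM a.2) ||
        (!decide (pvLM a.2 < pvLM b.2) && decide (pvSz b.2 < pvSz a.2)))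
      (g0, pvEntry entries g0) [] = [(g0, pvEntry entries g0)] from rfl]
  rw [PySem.List.pyGet?_zero, ← List.head?_eq_getElem?,
    foldl_insertBy_head _ _ (g0, pvEntry entries g0) []]
  rw [List.foldl_map]
  simpa using pairfold_eq_argmax entries rest g0

-- ===== VERDICT (by name: the statement is the Claim_ definition above) =====
theorem choose_representative_spec : Claim_equal_choose_representative := by
  intro entries group _ hpre
  unfold Spec_choose_representative
  obtain ⟨hne, -⟩ := hpre
  cases group with
  | nil => exact absurd rfl hne
  | cons g0 rest => rw [a_eq_argmax, alt_eq_argmax]
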